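-- pv_equiv track=rewrite | github.com/0xVeryBigOrange/clawchain | mining-service/rewards.py | get_epoch_miner_pool
-- ===== SOURCE A (Python) =====
-- INITIAL_MINER_POOL = 50_000_000      # 50 CLAW (uclaw) — 100% fair launch
--
-- HALVING_EPOCHS = 210_000
--
-- MIN_REWARD = 1  # 最低 1 uclaw
--
-- def get_epoch_miner_pool(epoch: int) -> int:
--     """
--     获取指定 epoch 的矿工池奖励（带减半）。
--     与 Go keeper.GetBlockReward 一致。
--     """
--     halvings = epoch // HALVING_EPOCHS
--     reward = INITIAL_MINER_POOL
--     for _ in range(halvings):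
--         reward //= 2
--         if reward < MIN_REWARD:
--             reward = MIN_REWARD
--             break
--     return reward
-- ===== SOURCE B (Python) =====
-- INITIAL_MINER_POOL = 50_000_000
-- HALVING_EPOCHS = 210_000
-- MIN_REWARD = 1
--
-- def get_epoch_miner_pool(epoch: int) -> int:
--     # closed form: all the halvings at once via an arithmetic right shift,
--     # clamped below by MIN_REWARD; negative epochs shift by 0
--     halvings = max(epoch // HALVING_EPOCHS, 0)
--     return max(INITIAL_MINER_POOL >> halvings, MIN_REWARD)
-- ===== Notes on version B (the rewrite author's own statement) =====
-- stated objective: simpler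
-- what changed: Replaces the iterated halve-and-clamp loop with a closed form: one arithmetic right shift by max(epoch // HALVING_EPOCHS, 0) followed by a single max(..., MIN_REWARD) clamp.
import Mathlib
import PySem

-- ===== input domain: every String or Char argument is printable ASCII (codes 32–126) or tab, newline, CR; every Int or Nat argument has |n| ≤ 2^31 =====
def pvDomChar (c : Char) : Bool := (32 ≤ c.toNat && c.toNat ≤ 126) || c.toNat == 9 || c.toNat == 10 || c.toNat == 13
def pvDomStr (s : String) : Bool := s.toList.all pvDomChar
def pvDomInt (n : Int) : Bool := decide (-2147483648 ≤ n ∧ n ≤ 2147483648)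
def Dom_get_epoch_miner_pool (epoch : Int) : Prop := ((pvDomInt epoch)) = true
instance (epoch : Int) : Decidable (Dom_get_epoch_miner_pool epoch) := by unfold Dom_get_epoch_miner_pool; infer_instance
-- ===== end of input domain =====

-- B replaces A's halve-and-clamp loop with a closed form: one arithmetic right
-- shift by the (clamped-to-0) number of halvings, then a single max with MIN_REWARD.


-- ===== PORT A =====
-- the `for _ in range(halvings)` loop with its early `break`; for negative
-- halvings `range` is empty, matched exactly by Int.toNat = 0 there
def pvLoopA : Nat → Int → Int
  | 0, r => r
  | n+1, r =>
    let r' := PySem.Int.floordiv r 2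
    if r' < 1 then 1 else pvLoopA n r'

def get_epoch_miner_pool (epoch : Int) : Int :=
  let halvings := PySem.Int.floordiv epoch 210000
  pvLoopA halvings.toNat 50000000

-- ===== PORT B =====
-- Python's `x >> k` on ints is Lean's `x >>> k` (arithmetic shift); the shift
-- count max(halvings, 0) is ≥ 0, so Int.toNat is exact
def get_epoch_miner_pool_alt (epoch : Int) : Int :=
  let halvings := max (PySem.Int.floordiv epoch 210000) 0
  max ((50000000 : Int) >>> halvings.toNat) 1

-- ===== PRECONDITION & SPEC =====
def Spec_get_epoch_miner_pool (epoch : Int) (out : Int) : Prop := out = get_epoch_miner_pool_alt epoch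
instance (epoch : Int) (out : Int) : Decidable (Spec_get_epoch_miner_pool epoch out) := by unfold Spec_get_epoch_miner_pool; infer_instance

-- ===== CLAIM (what is proved, stated in full; the proofs are below) =====
def Claim_equal_get_epoch_miner_pool : Prop := ∀ (epoch : Int), Dom_get_epoch_miner_pool epoch → Spec_get_epoch_miner_pool epoch (get_epoch_miner_pool epoch)

-- ===== LEMMAS AND PROOFS =====

theorem pvLoopA_eq_shift (n : Nat) : ∀ (r : Int), 1 ≤ r → pvLoopA n r = max (r >>> n) 1 := by
  induction n with
  | zero =>
    intro r hr
    simp [pvLoopA]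
    omega
  | succ n ih =>
    intro r hr
    rw [pvLoopA]
    simp only [PySem.Int.floordiv]
    have hfd : Int.fdiv r 2 = r / 2 := by
      rw [Int.fdiv_eq_ediv_of_nonneg _ (by norm_num)]
    by_cases h : Int.fdiv r 2 < 1
    · have hr1 : r = 1 := by omega
      subst hr1
      simp only [h, if_true]
      have h2 : (2:Int) ≤ 2^(n+1) := by
        calc (2:Int) = 2^1 := by ring
        _ ≤ 2^(n+1) := by apply pow_le_pow_right₀ <;> omega
      have h0 : ((1 : Int) >>> (n+1)) = 0 := by
        rw [Int.shiftRight_eq_div_pow]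
        apply Int.ediv_eq_zero_of_lt (by norm_num)
        push_cast at h2 ⊢; omega
      rw [h0]
      simp
    · simp only [h, if_false]
      have h1 : 1 ≤ Int.fdiv r 2 := by omega
      rw [ih _ h1]
      congr 1
      have : n + 1 = 1 + n := by omega
      rw [this, Int.shiftRight_add]
      congr 1
      have : (r >>> (1:Nat)) = r / ((2:Int)^(1:Nat)) := by
        rw [Int.shiftRight_eq_div_pow]; push_cast; ring_nf
      rw [this]
      omega

-- ===== VERDICT (by name: the statement is the Claim_ definition above) =====
theorem get_epoch_miner_pool_spec : Claim_equal_get_epoch_miner_pool := by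
  unfold Claim_equal_get_epoch_miner_pool
  intro epoch _
  unfold Spec_get_epoch_miner_pool get_epoch_miner_pool get_epoch_miner_pool_alt
  have htn : (max (PySem.Int.floordiv epoch 210000) 0).toNat
      = (PySem.Int.floordiv epoch 210000).toNat := by omega
  show pvLoopA (PySem.Int.floordiv epoch 210000).toNat 50000000
      = max ((50000000:Int) >>> (max (PySem.Int.floordiv epoch 210000) 0).toNat) 1
  rw [htn]
  exact pvLoopA_eq_shift _ 50000000 (by omega)
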